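-- pv_equiv track=rewrite | github.com/78/xiaozhi-esp32 | scripts/release.py | _apply_auto_selects
-- ===== SOURCE A (Python) =====
-- _AUTO_SELECT_RULES: dict[str, list[str]] = {
--     "CONFIG_USE_ESP_BLUFI_WIFI_PROVISIONING": [
--         "CONFIG_BT_ENABLED=y",
--         "CONFIG_BT_BLUEDROID_ENABLED=y",
--         "CONFIG_BT_BLE_42_FEATURES_SUPPORTED=y",
--         "CONFIG_BT_BLE_50_FEATURES_SUPPORTED=n",
--         "CONFIG_BT_BLE_BLUFI_ENABLE=y",
--         "CONFIG_MBEDTLS_DHM_C=y",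
--     ],
-- }
--
-- def _apply_auto_selects(sdkconfig_append: list[str]) -> list[str]:
--     """Apply hardcoded auto-select rules to sdkconfig_append."""
--     items: list[str] = []
--     existing_keys: set[str] = set()
--
--     def _append_if_missing(entry: str) -> None:
--         key = entry.split("=", 1)[0]
--         if key not in existing_keys:
--             items.append(entry)
--             existing_keys.add(key)
--
--     # Preserve original order while tracking keys
--     for entry in sdkconfig_append:
--         _append_if_missing(entry)
--
--     # Apply auto-select rules
--     for key, deps in _AUTO_SELECT_RULES.items():
--         for entry in sdkconfig_append:
--             name, _, value = entry.partition("=")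
--             if name == key and value.lower().startswith("y"):
--                 for dep in deps:
--                     _append_if_missing(dep)
--                 break
--
--     return items
-- ===== SOURCE B (Python) =====
-- _AUTO_SELECT_RULES: dict[str, list[str]] = {
--     "CONFIG_USE_ESP_BLUFI_WIFI_PROVISIONING": [
--         "CONFIG_BT_ENABLED=y",
--         "CONFIG_BT_BLUEDROID_ENABLED=y",
--         "CONFIG_BT_BLE_42_FEATURES_SUPPORTED=y",
--         "CONFIG_BT_BLE_50_FEATURES_SUPPORTED=n",
--         "CONFIG_BT_BLE_BLUFI_ENABLE=y",
--         "CONFIG_MBEDTLS_DHM_C=y",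
--     ],
-- }
--
--
-- def _apply_auto_selects(sdkconfig_append: list[str]) -> list[str]:
--     """Single pass: dedup by key and record which keys are y-enabled, then apply rules."""
--     items: list[str] = []
--     keys: set[str] = set()
--     enabled: set[str] = set()
--     for entry in sdkconfig_append:
--         name, _, value = entry.partition("=")
--         if name not in keys:
--             items.append(entry)
--             keys.add(name)
--         if value.lower().startswith("y"):
--             enabled.add(name)
--     for key, deps in _AUTO_SELECT_RULES.items():
--         if key in enabled:
--             for dep in deps:
--                 name = dep.partition("=")[0]
--                 if name not in keys:
--                     items.append(dep)
--                     keys.add(name)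
--     return items
-- ===== Notes on version B (the rewrite author's own statement) =====
-- stated objective: alternative
-- what changed: B builds the deduped list and a set of y-enabled keys in one pass over the input, then applies each rule by a set-membership test, replacing A's per-rule rescan-with-break over the original list.
import Mathlib
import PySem

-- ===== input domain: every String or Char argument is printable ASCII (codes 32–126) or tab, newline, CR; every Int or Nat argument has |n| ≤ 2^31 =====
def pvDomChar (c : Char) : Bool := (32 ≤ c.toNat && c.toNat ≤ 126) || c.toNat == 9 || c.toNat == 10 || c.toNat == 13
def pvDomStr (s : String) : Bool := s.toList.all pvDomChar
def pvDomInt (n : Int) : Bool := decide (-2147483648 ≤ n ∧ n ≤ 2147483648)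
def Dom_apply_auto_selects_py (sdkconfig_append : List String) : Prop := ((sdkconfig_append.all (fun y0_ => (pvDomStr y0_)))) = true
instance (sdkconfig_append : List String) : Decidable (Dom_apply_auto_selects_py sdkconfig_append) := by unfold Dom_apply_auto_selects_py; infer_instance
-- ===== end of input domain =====

-- B replaces A's per-rule rescan-with-break by a single pass that also collects the set of
-- y-enabled keys, applying rules via set membership (objective: alternative decomposition).

-- ===== PORT A =====
-- shared key/value extraction: entry.split("=",1)[0] / entry.partition("=") — hand port, exact
-- on all strings (chars before the first '=' are the key, chars after it the value, "" if none)
def pvKeyOf (entry : String) : String := String.mk (entry.toList.takeWhile (fun c => c ≠ '='))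
def pvValOf (entry : String) : String :=
  match entry.toList.dropWhile (fun c => c ≠ '=') with
  | [] => ""
  | _ :: rest => String.mk rest
-- value.lower().startswith("y")
def pvIsY (value : String) : Bool := PySem.Chars.startswith (PySem.Chars.lower value.toList) ['y']

def pvRules : List (String × List String) :=
  [("CONFIG_USE_ESP_BLUFI_WIFI_PROVISIONING",
    ["CONFIG_BT_ENABLED=y",
     "CONFIG_BT_BLUEDROID_ENABLED=y",
     "CONFIG_BT_BLE_42_FEATURES_SUPPORTED=y",
     "CONFIG_BT_BLE_50_FEATURES_SUPPORTED=n",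
     "CONFIG_BT_BLE_BLUFI_ENABLE=y",
     "CONFIG_MBEDTLS_DHM_C=y"])]

-- _append_if_missing over state (items, existing_keys)
def pvAppendIfMissing (st : List String × PySem.Set String) (entry : String) :
    List String × PySem.Set String :=
  if st.2.contains (pvKeyOf entry) then st else (st.1 ++ [entry], st.2.add (pvKeyOf entry))

-- A's inner 'for entry in sdkconfig_append: … break' for one rule
def pvRuleScanA (key : String) (deps : List String) (l : List String)
    (st : List String × PySem.Set String) : List String × PySem.Set String :=
  match l with
  | [] => st
  | e :: rest =>
      if pvKeyOf e == key && pvIsY (pvValOf e) then deps.foldl pvAppendIfMissing st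
      else pvRuleScanA key deps rest st

def apply_auto_selects_py (sdkconfig_append : List String) : List String :=
  let st := sdkconfig_append.foldl pvAppendIfMissing ([], PySem.Set.empty)
  (pvRules.foldl (fun st kd => pvRuleScanA kd.1 kd.2 sdkconfig_append st) st).1

-- ===== PORT B =====
-- B's single pass: dedup by key and collect the set of y-enabled keys
def pvStepB (st : List String × PySem.Set String × PySem.Set String) (entry : String) :
    List String × PySem.Set String × PySem.Set String :=
  let name := pvKeyOf entry
  let st1 := if st.2.1.contains name then st else (st.1 ++ [entry], st.2.1.add name, st.2.2)
  if pvIsY (pvValOf entry) then (st1.1, st1.2.1, st1.2.2.add name) else st1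

def apply_auto_selects_py_alt (sdkconfig_append : List String) : List String :=
  let st := sdkconfig_append.foldl pvStepB ([], PySem.Set.empty, PySem.Set.empty)
  (pvRules.foldl
    (fun acc kd => if st.2.2.contains kd.1 then kd.2.foldl pvAppendIfMissing acc else acc)
    (st.1, st.2.1)).1

-- ===== PRECONDITION & SPEC =====
def Spec_apply_auto_selects_py (sdkconfig_append : List String) (out : List String) : Prop := out = apply_auto_selects_py_alt sdkconfig_append
instance (sdkconfig_append : List String) (out : List String) : Decidable (Spec_apply_auto_selects_py sdkconfig_append out) := by unfold Spec_apply_auto_selects_py; infer_instance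

-- ===== CLAIM (what is proved, stated in full; the proofs are below) =====
def Claim_equal_apply_auto_selects_py : Prop := ∀ (sdkconfig_append : List String), Dom_apply_auto_selects_py sdkconfig_append → Spec_apply_auto_selects_py sdkconfig_append (apply_auto_selects_py sdkconfig_append)

-- ===== LEMMAS AND PROOFS =====

-- B's fold projects onto A's dedup fold
lemma pv_stepB_proj (l : List String) (items : List String) (keys en : PySem.Set String) :
    ((l.foldl pvStepB (items, keys, en)).1, (l.foldl pvStepB (items, keys, en)).2.1)
      = l.foldl pvAppendIfMissing (items, keys) := by
  induction l generalizing items keys en with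
  | nil => rfl
  | cons e rest ih =>
      simp only [List.foldl_cons, pvStepB, pvAppendIfMissing, PySem.Set.contains]
      by_cases h : pvKeyOf e ∈ keys <;>
        by_cases hy : pvIsY (pvValOf e) <;> simp [h, hy, ih]

-- B's enabled set records exactly the keys some occurrence enables
lemma pv_stepB_enabled (l : List String) (items : List String) (keys en : PySem.Set String)
    (k : String) :
    k ∈ (l.foldl pvStepB (items, keys, en)).2.2
      ↔ (k ∈ en ∨ ∃ e ∈ l, pvKeyOf e = k ∧ pvIsY (pvValOf e) = true) := by
  induction l generalizing items keys en with
  | nil => simp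
  | cons e rest ih =>
      by_cases hy : pvIsY (pvValOf e) = true <;>
        by_cases h : keys.contains (pvKeyOf e) = true <;>
          simp only [List.foldl_cons, pvStepB, h, hy, Bool.false_eq_true, ite_true, ite_false] <;>
          rw [ih]
      case pos | neg =>
        rw [PySem.Set.mem_add]
        constructor
        · rintro ((hk | hk) | ⟨x, hx, h1, h2⟩)
          · exact Or.inl hk
          · exact Or.inr ⟨e, List.mem_cons_self, hk.symm, hy⟩
          · exact Or.inr ⟨x, List.mem_cons_of_mem _ hx, h1, h2⟩
        · rintro (hk | ⟨x, hx, h1, h2⟩)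
          · exact Or.inl (Or.inl hk)
          · rcases List.mem_cons.mp hx with rfl | hx
            · exact Or.inl (Or.inr h1.symm)
            · exact Or.inr ⟨x, hx, h1, h2⟩
      all_goals
        constructor
        · rintro (hk | ⟨x, hx, h1, h2⟩)
          · exact Or.inl hk
          · exact Or.inr ⟨x, List.mem_cons_of_mem _ hx, h1, h2⟩
        · rintro (hk | ⟨x, hx, h1, h2⟩)
          · exact Or.inl hk
          · rcases List.mem_cons.mp hx with rfl | hx
            · exact absurd h2 hy
            · exact Or.inr ⟨x, hx, h1, h2⟩

-- A's scan-with-break is the existence test followed by one deps fold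
lemma pv_scanA_eq (key : String) (deps : List String) (l : List String)
    (st : List String × PySem.Set String) :
    pvRuleScanA key deps l st
      = if l.any (fun e => pvKeyOf e == key && pvIsY (pvValOf e))
        then deps.foldl pvAppendIfMissing st else st := by
  induction l with
  | nil => rfl
  | cons e rest ih =>
      simp only [pvRuleScanA, List.any_cons]
      by_cases h : (pvKeyOf e == key && pvIsY (pvValOf e)) = true <;> simp [h, ih]

-- ===== VERDICT (by name: the statement is the Claim_ definition above) =====
theorem apply_auto_selects_py_spec : Claim_equal_apply_auto_selects_py := by
  intro l _
  show apply_auto_selects_py l = apply_auto_selects_py_alt l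
  unfold apply_auto_selects_py apply_auto_selects_py_alt
  simp only [pvRules, List.foldl_cons, List.foldl_nil, pv_scanA_eq]
  have hproj := pv_stepB_proj l [] PySem.Set.empty PySem.Set.empty
  have h1 : (l.foldl pvStepB ([], PySem.Set.empty, PySem.Set.empty)).1
      = (l.foldl pvAppendIfMissing ([], PySem.Set.empty)).1 := by rw [← hproj]
  have h2 : (l.foldl pvStepB ([], PySem.Set.empty, PySem.Set.empty)).2.1
      = (l.foldl pvAppendIfMissing ([], PySem.Set.empty)).2 := by rw [← hproj]
  have hen : ((l.foldl pvStepB ([], PySem.Set.empty, PySem.Set.empty)).2.2).contains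
        "CONFIG_USE_ESP_BLUFI_WIFI_PROVISIONING"
      = l.any (fun e => pvKeyOf e == "CONFIG_USE_ESP_BLUFI_WIFI_PROVISIONING"
          && pvIsY (pvValOf e)) := by
    rw [Bool.eq_iff_iff]
    simp [PySem.Set.contains, pv_stepB_enabled, PySem.Set.empty, List.any_eq_true,
      Bool.and_eq_true, beq_iff_eq]
  rw [hen]
  simp only [PySem.Set.empty] at hproj h1 h2
  by_cases h : l.any (fun e => pvKeyOf e == "CONFIG_USE_ESP_BLUFI_WIFI_PROVISIONING"
      && pvIsY (pvValOf e)) <;> simp [h, h1, h2]
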